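-- pv_equiv track=rewrite | github.com/atranitell/TensorGate | _deprecated/gate/utils/string.py | clip_last_sub_string
-- ===== SOURCE A (Python) =====
-- def clip_last_sub_string(string, separator='/', keep_sep=False):
--     """ raw: a/b/c/d/e
--         return: a/b/c/d/
--     """
--     st = str(string).split(separator)
--     nw = ''
--     for i in range(len(st) - 1):
--         if keep_sep is True and i == len(st) - 2:
--             nw += st[i]
--         else:
--             nw += st[i] + separator
--     return nw
-- ===== SOURCE B (Python) =====
-- def clip_last_sub_string(string, separator='/', keep_sep=False):
--     """Single scan: repeatedly find the next (greedy, non-overlapping) occurrence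
--     of separator, remember the last one, then slice -- no split list, no join loop."""
--     s = str(string)
--     pos = 0
--     last = -1
--     while True:
--         j = s.find(separator, pos)
--         if j == -1:
--             break
--         last = j
--         pos = j + len(separator)
--     if last == -1:
--         return ''
--     return s[:last] if keep_sep is True else s[:last + len(separator)]
-- ===== Notes on version B (the rewrite author's own statement) =====
-- stated objective: alternative
-- what changed: Replaces split-into-a-list plus an index loop concatenating the chunks by a single find-scan that records the last greedy separator occurrence and returns one slice of the original string.
import Mathlib
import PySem

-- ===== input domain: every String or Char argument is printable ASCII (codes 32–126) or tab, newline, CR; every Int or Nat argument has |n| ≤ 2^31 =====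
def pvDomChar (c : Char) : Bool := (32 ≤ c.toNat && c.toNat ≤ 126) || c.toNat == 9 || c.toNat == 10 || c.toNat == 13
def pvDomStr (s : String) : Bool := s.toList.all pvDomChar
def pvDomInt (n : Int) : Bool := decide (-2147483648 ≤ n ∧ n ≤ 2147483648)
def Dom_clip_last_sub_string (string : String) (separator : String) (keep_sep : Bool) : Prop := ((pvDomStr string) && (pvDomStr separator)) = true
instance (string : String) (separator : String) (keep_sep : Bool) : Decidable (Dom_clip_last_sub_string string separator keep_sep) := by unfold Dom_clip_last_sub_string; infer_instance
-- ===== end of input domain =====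

-- B replaces A's split-into-a-list plus index-loop concatenation by a single find-scan
-- recording the last greedy separator occurrence, followed by one slice (alternative algorithm).

-- ===== PORT A =====
-- st = str(string).split(separator); Chars.splitOn is the separator ≠ "" form of split
-- (an empty separator raises ValueError in Python; Pre_ excludes it).
def clip_last_sub_string (string : String) (separator : String) (keep_sep : Bool) : String :=
  let st : List (List Char) := PySem.Chars.splitOn string.toList separator.toList
  let n : Int := st.length
  -- nw = ''; for i in range(len(st)-1): nw += st[i] (+ separator unless keep_sep and i == len(st)-2)
  String.ofList ((PySem.List.pyRange 0 (n - 1) 1).foldl (fun nw i =>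
    if keep_sep && (i == n - 2) then nw ++ PySem.List.pyGetD st i []
    else nw ++ PySem.List.pyGetD st i [] ++ separator.toList) [])

-- ===== PORT B =====
-- the while loop of Source B: j = s.find(separator, pos); stop at -1, else remember j, pos = j + len(separator)
-- (fuel = len(s)+1 bounds the iterations: pos strictly increases while pos ≤ len(s), for separator ≠ '')
def bLoop (s sep : List Char) : Nat → Nat → Int → Int
  | 0, _, last => last
  | fuel + 1, pos, last =>
    let j := PySem.Chars.findFrom s sep (pos : Int)
    if j = -1 then last
    else bLoop s sep fuel (j.toNat + sep.length) j

def clip_last_sub_string_alt (string : String) (separator : String) (keep_sep : Bool) : String :=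
  let s := string.toList
  let last := bLoop s separator.toList (s.length + 1) 0 (-1)
  if last = -1 then ""
  else if keep_sep then String.ofList (PySem.Chars.slice s none (some last))          -- s[:last]
  else String.ofList (PySem.Chars.slice s none (some (last + separator.toList.length)))  -- s[:last+len(separator)]

-- ===== PRECONDITION & SPEC =====
-- Pre_ excludes only the empty separator, on which Python's str.split raises ValueError.
def Pre_clip_last_sub_string (string : String) (separator : String) (keep_sep : Bool) : Prop := separator ≠ ""
instance (string : String) (separator : String) (keep_sep : Bool) : Decidable (Pre_clip_last_sub_string string separator keep_sep) := by unfold Pre_clip_last_sub_string; infer_instance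
def pvWitness_clip_last_sub_string : String × String × Bool := ("a/b/c", "/", false)

def Spec_clip_last_sub_string (string : String) (separator : String) (keep_sep : Bool) (out : String) : Prop := out = clip_last_sub_string_alt string separator keep_sep
instance (string : String) (separator : String) (keep_sep : Bool) (out : String) : Decidable (Spec_clip_last_sub_string string separator keep_sep out) := by unfold Spec_clip_last_sub_string; infer_instance

-- ===== CLAIM (what is proved, stated in full; the proofs are below) =====
def Claim_equal_clip_last_sub_string : Prop := ∀ (string : String) (separator : String) (keep_sep : Bool), Dom_clip_last_sub_string string separator keep_sep → Pre_clip_last_sub_string string separator keep_sep → Spec_clip_last_sub_string string separator keep_sep (clip_last_sub_string string separator keep_sep)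

-- ===== LEMMAS AND PROOFS =====

-- reference greedy splitter (the recursion splitOn.go performs, without fuel/accumulators)
def gsplit (sep : List Char) (hsep : sep ≠ []) : List Char → List Char → List (List Char)
  | [], cur => [cur.reverse]
  | c :: rest, cur =>
    if sep.isPrefixOf (c :: rest) then
      cur.reverse :: gsplit sep hsep ((c :: rest).drop sep.length) []
    else gsplit sep hsep rest (c :: cur)
termination_by l _ => l.length
decreasing_by
  · have : 0 < sep.length := List.length_pos_iff.mpr hsep
    simp [List.length_drop]; omega
  · simp

theorem gsplit_ne_nil (sep : List Char) (hsep : sep ≠ []) (l cur : List Char) :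
    gsplit sep hsep l cur ≠ [] := by
  fun_induction gsplit <;> simp_all

theorem splitOn_go_eq (sep : List Char) (hsep : sep ≠ []) :
    ∀ (fuel : Nat) (l cur : List Char) (acc : List (List Char)), l.length ≤ fuel →
    PySem.Chars.splitOn.go sep fuel l cur acc = acc.reverse ++ gsplit sep hsep l cur := by
  intro fuel
  induction fuel with
  | zero =>
    intro l cur acc h
    have hl : l = [] := by cases l <;> simp_all
    subst hl
    rw [PySem.Chars.splitOn.go.eq_def]
    simp [gsplit]
  | succ fuel ih =>
    intro l cur acc h
    cases l with
    | nil =>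
      rw [PySem.Chars.splitOn.go.eq_def]
      simp [gsplit]
    | cons c rest =>
      rw [PySem.Chars.splitOn.go.eq_def]
      by_cases hp : sep.isPrefixOf (c :: rest)
      · have hs : 0 < sep.length := List.length_pos_iff.mpr hsep
        simp only [hp, if_true]
        rw [ih ((c :: rest).drop sep.length) [] (cur.reverse :: acc)
            (by simp [List.length_drop]; simp at h; omega)]
        rw [gsplit]
        simp [hp]
      · simp only [hp, if_false, Bool.false_eq_true]
        rw [ih rest (c :: cur) acc (by simp at h; omega)]
        rw [gsplit]
        simp [hp]

theorem splitOn_eq_gsplit (l sep : List Char) (hsep : sep ≠ []) :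
    PySem.Chars.splitOn l sep = gsplit sep hsep l [] := by
  unfold PySem.Chars.splitOn
  rw [splitOn_go_eq sep hsep (l.length + 1) l [] [] (by omega)]
  simp

theorem find_eq_zero_of_prefix {l sep : List Char} (h : sep.isPrefixOf l) :
    PySem.Chars.find l sep = 0 := by
  have hpre : sep <+: l := List.isPrefixOf_iff_prefix.mp h
  have h0 : 0 ≤ PySem.Chars.find l sep := (PySem.Chars.find_nonneg_iff l sep).mpr hpre.isInfix
  obtain ⟨-, hmin⟩ := PySem.Chars.find_spec h0
  by_contra hne
  have hk : 0 < (PySem.Chars.find l sep).toNat := by omega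
  exact hmin 0 hk (by simpa using hpre)

theorem find_cons {c : Char} {rest sep : List Char} (hnp : ¬ sep.isPrefixOf (c :: rest)) :
    PySem.Chars.find (c :: rest) sep =
      if PySem.Chars.find rest sep = -1 then -1 else PySem.Chars.find rest sep + 1 := by
  by_cases hr : PySem.Chars.find rest sep = -1
  · simp only [hr, if_true]
    rw [PySem.Chars.find_eq_neg_one_iff] at hr ⊢
    intro hinf
    rcases List.infix_cons_iff.mp hinf with hpre | hinf'
    · exact hnp (List.isPrefixOf_iff_prefix.mpr hpre)
    · exact hr hinf'
  · simp only [hr, if_false]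
    have h0r : 0 ≤ PySem.Chars.find rest sep := by
      have := PySem.Chars.neg_one_le_find rest sep; omega
    obtain ⟨hpr, hminr⟩ := PySem.Chars.find_spec h0r
    have hinf : sep <:+: (c :: rest) :=
      List.infix_cons_iff.mpr (Or.inr ((PySem.Chars.find_nonneg_iff rest sep).mp h0r))
    have h0 : 0 ≤ PySem.Chars.find (c :: rest) sep :=
      (PySem.Chars.find_nonneg_iff _ _).mpr hinf
    obtain ⟨hp, hmin⟩ := PySem.Chars.find_spec h0
    set k := (PySem.Chars.find (c :: rest) sep).toNat with hkdef
    set j := (PySem.Chars.find rest sep).toNat with hjdef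
    have hk0 : k ≠ 0 := by
      intro hk
      rw [hk] at hp
      exact hnp (List.isPrefixOf_iff_prefix.mpr (by simpa using hp))
    have hk_le : k ≤ j + 1 := by
      by_contra hlt
      exact hmin (j + 1) (by omega) (by simpa [List.drop_succ_cons] using hpr)
    have hj_le : j ≤ k - 1 := by
      by_contra hlt
      refine hminr (k - 1) (by omega) ?_
      have : sep <+: List.drop k (c :: rest) := hp
      have hkeq : k = (k - 1) + 1 := by omega
      rw [hkeq, List.drop_succ_cons] at this
      exact this
    omega

-- one-step unfolding of gsplit at the FIRST occurrence of sep
theorem gsplit_eq (sep : List Char) (hsep : sep ≠ []) (l cur : List Char) :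
    gsplit sep hsep l cur =
      if PySem.Chars.find l sep = -1 then [cur.reverse ++ l]
      else (cur.reverse ++ l.take (PySem.Chars.find l sep).toNat) ::
           gsplit sep hsep (l.drop ((PySem.Chars.find l sep).toNat + sep.length)) [] := by
  fun_induction gsplit with
  | case1 cur =>
    have hn : PySem.Chars.find [] sep = -1 :=
      (PySem.Chars.find_eq_neg_one_iff [] sep).mpr (by simpa [List.infix_nil] using hsep)
    simp [hn]
  | case2 c rest cur hp ih =>
    have h0 : PySem.Chars.find (c :: rest) sep = 0 := find_eq_zero_of_prefix hp
    simp [h0]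
  | case3 c rest cur hp ih =>
    rw [ih]
    rw [find_cons (by simpa using hp)]
    by_cases hr : PySem.Chars.find rest sep = -1
    · simp [hr]
    · have h0r : 0 ≤ PySem.Chars.find rest sep := by
        have := PySem.Chars.neg_one_le_find rest sep; omega
      have hne : ¬ (PySem.Chars.find rest sep + 1 = -1) := by omega
      have htn : (PySem.Chars.find rest sep + 1).toNat = (PySem.Chars.find rest sep).toNat + 1 := by
        omega
      simp only [hr, if_false, hne, htn]
      simp only [List.take_succ_cons, List.cons_append, List.reverse_cons, List.append_assoc,
        List.cons.injEq]
      constructor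
      · rfl
      · have harr : (PySem.Chars.find rest sep).toNat + 1 + sep.length
            = ((PySem.Chars.find rest sep).toNat + sep.length) + 1 := by omega
        rw [harr, List.drop_succ_cons]

-- position (if any) of the LAST greedy occurrence of sep in l
def lastg (sep : List Char) (hsep : sep ≠ []) (l : List Char) : Option Nat :=
  if h : PySem.Chars.find l sep = -1 then none
  else
    match lastg sep hsep (l.drop ((PySem.Chars.find l sep).toNat + sep.length)) with
    | none => some (PySem.Chars.find l sep).toNat
    | some k => some ((PySem.Chars.find l sep).toNat + sep.length + k)
termination_by l.length
decreasing_by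
  have h1 : sep <:+: l := (PySem.Chars.find_ne_neg_one_iff l sep).mp h
  have h2 := h1.length_le
  have h3 : 0 < sep.length := List.length_pos_iff.mpr hsep
  simp [List.length_drop]; omega

theorem lastg_eq_none_iff (sep : List Char) (hsep : sep ≠ []) (l : List Char) :
    lastg sep hsep l = none ↔ PySem.Chars.find l sep = -1 := by
  rw [lastg]; split
  · simp_all
  · rename_i h; cases hm : lastg sep hsep (l.drop ((PySem.Chars.find l sep).toNat + sep.length)) <;>
      simp_all

theorem lastg_spec (sep : List Char) (hsep : sep ≠ []) :
    ∀ (l : List Char) (p : Nat), lastg sep hsep l = some p →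
      sep <+: l.drop p ∧ p + sep.length ≤ l.length := by
  intro l
  induction l using lastg.induct sep hsep with
  | case1 l h =>
    intro p hp
    rw [lastg, dif_pos h] at hp
    exact absurd hp (by simp)
  | case2 l h hm ih =>
    intro p hp
    rw [lastg, dif_neg h, hm] at hp
    simp only [Option.some.injEq] at hp
    subst hp
    have h0 : 0 ≤ PySem.Chars.find l sep := by
      have := PySem.Chars.neg_one_le_find l sep; omega
    obtain ⟨hpre, -⟩ := PySem.Chars.find_spec h0
    refine ⟨hpre, ?_⟩
    have hsl : 0 < sep.length := List.length_pos_iff.mpr hsep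
    have hll := hpre.length_le
    rw [List.length_drop] at hll
    omega
  | case3 l h k hm ih =>
    intro p hp
    rw [lastg, dif_neg h, hm] at hp
    simp only [Option.some.injEq] at hp
    subst hp
    obtain ⟨hpre, hlen⟩ := ih k hm
    rw [List.drop_drop] at hpre
    refine ⟨hpre, ?_⟩
    have hsl : 0 < sep.length := List.length_pos_iff.mpr hsep
    rw [List.length_drop] at hlen
    omega

-- A's joined value in closed form: all chunks but the last, each followed by sep
theorem flatMap_gsplit (sep : List Char) (hsep : sep ≠ []) (l : List Char) :
    ((gsplit sep hsep l []).dropLast).flatMap (fun c => c ++ sep) =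
      (match lastg sep hsep l with
       | none => []
       | some p => l.take (p + sep.length)) := by
  induction l using lastg.induct sep hsep with
  | case1 l h =>
    rw [lastg, dif_pos h]
    rw [gsplit_eq sep hsep l [], if_pos h]
    simp
  | case2 l h hm ih =>
    rw [lastg, dif_neg h, hm]
    rw [gsplit_eq sep hsep l [], if_neg h]
    have hf' : PySem.Chars.find (l.drop ((PySem.Chars.find l sep).toNat + sep.length)) sep = -1 :=
      (lastg_eq_none_iff sep hsep _).mp hm
    rw [gsplit_eq sep hsep _ [], if_pos hf']
    have h0 : 0 ≤ PySem.Chars.find l sep := by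
      have := PySem.Chars.neg_one_le_find l sep; omega
    obtain ⟨hpre, -⟩ := PySem.Chars.find_spec h0
    obtain ⟨t, ht⟩ := hpre
    have hd1 : ([l.drop ((PySem.Chars.find l sep).toNat + sep.length)] : List (List Char)).dropLast
        = ([] : List (List Char)) := rfl
    simp only [List.dropLast_cons₂, hd1, List.flatMap_cons, List.flatMap_nil,
      List.reverse_nil, List.nil_append, List.append_nil]
    rw [List.take_add, ← ht, List.take_left]
  | case3 l h k hm ih =>
    rw [lastg, dif_neg h, hm]
    rw [gsplit_eq sep hsep l [], if_neg h]
    have hne := gsplit_ne_nil sep hsep (l.drop ((PySem.Chars.find l sep).toNat + sep.length)) []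
    rw [List.dropLast_cons_of_ne_nil hne]
    rw [List.flatMap_cons]
    rw [ih, hm]
    dsimp only
    have h0 : 0 ≤ PySem.Chars.find l sep := by
      have := PySem.Chars.neg_one_le_find l sep; omega
    obtain ⟨hpre, -⟩ := PySem.Chars.find_spec h0
    obtain ⟨t, ht⟩ := hpre
    have harr : (PySem.Chars.find l sep).toNat + sep.length + k + sep.length
        = ((PySem.Chars.find l sep).toNat + sep.length) + (k + sep.length) := by omega
    have e1 : List.take ((PySem.Chars.find l sep).toNat + sep.length) l
        = List.take (PySem.Chars.find l sep).toNat l ++ sep := by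
      rw [List.take_add, ← ht, List.take_left]
    conv_rhs => rw [harr, List.take_add]
    rw [e1]
    simp [List.append_assoc]

-- B's loop in closed form
theorem bLoop_eq (s sep : List Char) (hsep : sep ≠ []) :
    ∀ (fuel pos : Nat) (last : Int), pos ≤ s.length → s.length + 1 - pos ≤ fuel →
      bLoop s sep fuel pos last =
        (match lastg sep hsep (s.drop pos) with
         | none => last
         | some k => ((pos + k : Nat) : Int)) := by
  intro fuel
  induction fuel with
  | zero => intro pos last h1 h2; omega
  | succ fuel ih =>
    intro pos last h1 h2
    rw [bLoop]
    rw [PySem.Chars.findFrom_natCast s sep pos h1]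
    by_cases hf : PySem.Chars.find (s.drop pos) sep = -1
    · simp only [hf, if_true]
      rw [(lastg_eq_none_iff sep hsep (s.drop pos)).mpr hf]
    · have h0 : 0 ≤ PySem.Chars.find (s.drop pos) sep := by
        have := PySem.Chars.neg_one_le_find (s.drop pos) sep; omega
      obtain ⟨hpre, -⟩ := PySem.Chars.find_spec h0
      have hsl : 0 < sep.length := List.length_pos_iff.mpr hsep
      have hlen : (PySem.Chars.find (s.drop pos) sep).toNat + sep.length ≤ s.length - pos := by
        have hll := hpre.length_le
        rw [List.length_drop, List.length_drop] at hll
        omega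
      have hne : ¬ ((pos : Int) + PySem.Chars.find (s.drop pos) sep = -1) := by omega
      simp only [hf, if_false, hne]
      have htn : ((pos : Int) + PySem.Chars.find (s.drop pos) sep).toNat
          = pos + (PySem.Chars.find (s.drop pos) sep).toNat := by omega
      rw [htn]
      rw [ih (pos + (PySem.Chars.find (s.drop pos) sep).toNat + sep.length)
          ((pos : Int) + PySem.Chars.find (s.drop pos) sep) (by omega) (by omega)]
      have hdd : s.drop (pos + (PySem.Chars.find (s.drop pos) sep).toNat + sep.length)
          = (s.drop pos).drop ((PySem.Chars.find (s.drop pos) sep).toNat + sep.length) := by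
        rw [List.drop_drop]; ring_nf
      rw [hdd]
      have hR : lastg sep hsep (s.drop pos)
          = match lastg sep hsep ((s.drop pos).drop ((PySem.Chars.find (s.drop pos) sep).toNat + sep.length)) with
            | none => some (PySem.Chars.find (s.drop pos) sep).toNat
            | some k => some ((PySem.Chars.find (s.drop pos) sep).toNat + sep.length + k) := by
        conv_lhs => rw [lastg]
        rw [dif_neg hf]
      rw [hR]
      cases hm : lastg sep hsep ((s.drop pos).drop ((PySem.Chars.find (s.drop pos) sep).toNat + sep.length)) with
      | none =>
        simp only []
        push_cast [Int.toNat_of_nonneg h0]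
        ring
      | some k => simp only []; push_cast; ring

-- A's dropLast-join, split at its last chunk
theorem dropLast_flatMap (st : List (List Char)) (sp : List Char) (hn : 2 ≤ st.length) :
    (st.dropLast).flatMap (fun c => c ++ sp)
    = (st.take (st.length - 2)).flatMap (fun c => c ++ sp) ++ st[st.length - 2]'(by omega) ++ sp := by
  rw [List.dropLast_eq_take]
  have h1 : st.length - 1 = (st.length - 2) + 1 := by omega
  rw [h1, ← List.take_concat_get (by omega)]
  simp only [List.concat_eq_append, List.flatMap_append, List.flatMap_cons, List.flatMap_nil,
    List.append_nil, List.append_assoc]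

-- reduction of A's index loop to a closed form
theorem foldA (st : List (List Char)) (sp : List Char) (keep : Bool) (hn : 2 ≤ st.length) :
    (PySem.List.pyRange 0 ((st.length : Int) - 1) 1).foldl (fun nw i =>
      if keep && (i == (st.length : Int) - 2) then nw ++ PySem.List.pyGetD st i []
      else nw ++ PySem.List.pyGetD st i [] ++ sp) []
    = (st.take (st.length - 2)).flatMap (fun c => c ++ sp) ++ st[st.length - 2]'(by omega)
      ++ (if keep then [] else sp) := by
  have hsplit : (st.length : Int) - 1 = ((st.length : Int) - 2) + 1 := by ring
  rw [hsplit, PySem.List.pyRange_one_succ_right (by omega)]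
  rw [List.foldl_append]
  have hP : (PySem.List.pyRange 0 ((st.length : Int) - 2) 1).foldl (fun nw i =>
      if keep && (i == (st.length : Int) - 2) then nw ++ PySem.List.pyGetD st i []
      else nw ++ PySem.List.pyGetD st i [] ++ sp) []
      = (st.take (st.length - 2)).flatMap (fun c => c ++ sp) := by
    have hcongr := PySem.List.foldl_congr_mem
      (PySem.List.pyRange 0 ((st.length : Int) - 2) 1)
      (fun nw i => if keep && (i == (st.length : Int) - 2) then nw ++ PySem.List.pyGetD st i []
        else nw ++ PySem.List.pyGetD st i [] ++ sp)
      (fun nw i => nw ++ PySem.List.pyGetD (st.take (st.length - 2)) i [] ++ sp)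
      []
      (by
        intro acc x hx
        rw [PySem.List.mem_pyRange_one] at hx
        have hxne : (x == (st.length : Int) - 2) = false := by
          rw [beq_eq_false_iff_ne]; omega
        simp only [hxne, Bool.and_false, Bool.false_eq_true, if_false]
        rw [PySem.List.pyGetD_eq_getElem st [] (by omega) (by omega),
            PySem.List.pyGetD_eq_getElem (st.take (st.length - 2)) [] (by omega)
              (by simp [List.length_take]; omega)]
        rw [List.getElem_take])
    rw [hcongr]
    have hlen2 : ((st.take (st.length - 2)).length : Int) = (st.length : Int) - 2 := by
      simp [List.length_take]; omega
    rw [← hlen2]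
    rw [PySem.List.foldl_pyRange_zero_pyGetD' (st.take (st.length - 2)) []
      (fun acc c => acc ++ c ++ sp) []]
    simp only [List.append_assoc]
    rw [PySem.List.foldl_append_eq_flatMap]
    simp
  rw [hP]
  simp only [List.foldl_cons, List.foldl_nil, beq_self_eq_true, Bool.and_true]
  have htn : (((st.length : Int) - 2)).toNat = st.length - 2 := by omega
  rw [PySem.List.pyGetD_eq_getElem st [] (by omega) (by omega)]
  cases keep with
  | true => simp [htn]
  | false => simp [htn]

-- ===== VERDICT (by name: the statement is the Claim_ definition above) =====
theorem clip_last_sub_string_spec : Claim_equal_clip_last_sub_string := by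
  unfold Claim_equal_clip_last_sub_string
  intro s sep keep _ hpre
  unfold Spec_clip_last_sub_string
  unfold Pre_clip_last_sub_string at hpre
  have hsep : sep.toList ≠ [] := fun h => hpre (String.toList_eq_nil_iff.mp h)
  unfold clip_last_sub_string clip_last_sub_string_alt
  dsimp only
  rw [splitOn_eq_gsplit _ _ hsep]
  rw [bLoop_eq s.toList sep.toList hsep (s.toList.length + 1) 0 (-1) (by omega) (by omega)]
  rw [List.drop_zero]
  cases hL : lastg sep.toList hsep s.toList with
  | none =>
    have hf : PySem.Chars.find s.toList sep.toList = -1 := (lastg_eq_none_iff _ hsep _).mp hL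
    rw [gsplit_eq _ hsep, if_pos hf]
    simp [PySem.List.pyRange_one_eq_nil]
  | some p =>
    have hf : ¬ PySem.Chars.find s.toList sep.toList = -1 := by
      intro h
      rw [← lastg_eq_none_iff sep.toList hsep] at h
      rw [hL] at h; cases h
    -- B side
    have hpne : ¬ (((0 + p : Nat) : Int) = -1) := by omega
    simp only [if_neg hpne]
    -- A side: the split has at least two chunks
    rw [gsplit_eq _ hsep, if_neg hf]
    set st := ([].reverse ++ s.toList.take (PySem.Chars.find s.toList sep.toList).toNat) ::
      gsplit sep.toList hsep
        (s.toList.drop ((PySem.Chars.find s.toList sep.toList).toNat + sep.toList.length)) []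
      with hst
    have hn : 2 ≤ st.length := by
      have hg := gsplit_ne_nil sep.toList hsep
        (s.toList.drop ((PySem.Chars.find s.toList sep.toList).toNat + sep.toList.length)) []
      have hlp := List.length_pos_iff.mpr hg
      rw [hst]
      simp only [List.length_cons]
      omega
    rw [foldA st sep.toList keep hn]
    have hgst : gsplit sep.toList hsep s.toList [] = st := by
      rw [gsplit_eq _ hsep, if_neg hf, hst]
    have hfg := flatMap_gsplit sep.toList hsep s.toList
    rw [hL, hgst] at hfg
    have hfg2 : List.flatMap (fun c => c ++ sep.toList) st.dropLast
        = List.take (p + sep.toList.length) s.toList := hfg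
    have hdf := dropLast_flatMap st sep.toList hn
    rw [hfg2] at hdf
    -- sep.toList is a prefix of s.toList at p
    obtain ⟨hpreP, hlenP⟩ := lastg_spec sep.toList hsep s.toList p hL
    obtain ⟨t, ht⟩ := hpreP
    have htake : s.toList.take (p + sep.toList.length) = s.toList.take p ++ sep.toList := by
      rw [List.take_add, ← ht, List.take_left]
    cases keep with
    | false =>
      simp only [Bool.false_eq_true, if_false]
      rw [← hdf]
      congr 1
      · rw [Nat.zero_add]
        rw [PySem.Chars.slice_eq_listSlice]
        have hcast : ((p : Int) + (sep.toList.length : Int)) = ((p + sep.toList.length : Nat) : Int) := by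
          push_cast; ring
        rw [hcast, PySem.List.slice_to_natCast]
    | true =>
      simp only [if_true]
      rw [List.append_nil]
      have hcancel : (st.take (st.length - 2)).flatMap (fun c => c ++ sep.toList)
          ++ st[st.length - 2]'(by omega) = s.toList.take p := by
        apply List.append_cancel_right (bs := sep.toList)
        rw [← hdf, htake]
      rw [hcancel]
      rw [Nat.zero_add]
      rw [PySem.Chars.slice_eq_listSlice, PySem.List.slice_to_natCast]
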